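-- pv_equiv track=rewrite | github.com/Teffa14/AutoPTU | auto_ptu/ai_battles.py | _summarize_log
-- ===== SOURCE A (Python) =====
-- from typing import Dict, List, Optional, Set
--
-- def _summarize_log(log: List[dict]) -> Dict[str, Dict[str, int]]:
--     moves: Dict[str, int] = {}
--     statuses: Dict[str, int] = {}
--     hazards: Dict[str, int] = {}
--     abilities: Dict[str, int] = {}
--     for entry in log:
--         move = entry.get("move")
--         if move:
--             key = str(move)
--             moves[key] = moves.get(key, 0) + 1
--         if entry.get("type") == "status":
--             status = entry.get("status")
--             if status:
--                 key = str(status)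
--                 statuses[key] = statuses.get(key, 0) + 1
--         if entry.get("type") == "hazard":
--             hazard = entry.get("hazard")
--             if hazard:
--                 key = str(hazard)
--                 hazards[key] = hazards.get(key, 0) + 1
--         if entry.get("type") == "ability":
--             ability = entry.get("ability")
--             if ability:
--                 key = str(ability)
--                 abilities[key] = abilities.get(key, 0) + 1
--     return {
--         "moves": moves,
--         "statuses": statuses,
--         "hazards": hazards,
--         "abilities": abilities,
--     }
-- ===== SOURCE B (Python) =====
-- def _summarize_log(log):
--     # Tagged event stream instead of four interleaved counters: each entry
--     # emits (category, key) tokens, one combined tally counts the tokens,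
--     # and the result is regrouped by category at the end.
--     CATS = (("statuses", "status"), ("hazards", "hazard"), ("abilities", "ability"))
--     stream = []
--     for entry in log:
--         move = entry.get("move")
--         if move:
--             stream.append(("moves", str(move)))
--         kind = entry.get("type")
--         for cat, field in CATS:
--             if kind == field:
--                 value = entry.get(field)
--                 if value:
--                     stream.append((cat, str(value)))
--     counts = {}
--     for token in stream:
--         counts[token] = counts.get(token, 0) + 1
--     return {cat: {k: n for (c, k), n in counts.items() if c == cat}
--             for cat in ("moves", "statuses", "hazards", "abilities")}
-- ===== Notes on version B (the rewrite author's own statement) =====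
-- stated objective: alternative
-- what changed: A's single loop maintaining four interleaved count-dicts is replaced by a tagged (category, key) event stream: each entry emits tokens, one combined tally counts the tokens, and the four dicts are recovered by regrouping the tally by category.
import Mathlib
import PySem

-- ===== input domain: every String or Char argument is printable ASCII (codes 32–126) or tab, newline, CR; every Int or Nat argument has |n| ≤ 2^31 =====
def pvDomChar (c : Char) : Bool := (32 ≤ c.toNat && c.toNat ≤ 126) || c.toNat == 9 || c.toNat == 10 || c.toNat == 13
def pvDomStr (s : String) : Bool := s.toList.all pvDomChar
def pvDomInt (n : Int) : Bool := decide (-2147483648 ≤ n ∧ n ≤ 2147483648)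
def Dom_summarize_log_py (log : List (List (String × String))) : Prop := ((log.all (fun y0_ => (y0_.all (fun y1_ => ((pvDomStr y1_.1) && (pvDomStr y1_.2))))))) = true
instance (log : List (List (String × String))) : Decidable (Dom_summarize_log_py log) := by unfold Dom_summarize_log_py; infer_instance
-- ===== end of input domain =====

-- B replaces A's single loop over four interleaved count-dicts by a tagged
-- (category, key) event stream, one combined tally over the tokens, and a
-- regrouping by category (objective: alternative decomposition, same cost).

-- entry.get(k): dicts are association lists, lookup = first match
def pvGet (e : List (String × String)) (k : String) : Option String :=
  (e.find? (fun p => p.1 == k)).map (fun p => p.2)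

-- 'v = e.get(k); if v:' — the field of e at k when truthy (str(v) = v on strings;
-- truthiness of a string = it is nonempty); used by both ports
def pvField (e : List (String × String)) (k : String) : Option String :=
  match pvGet e k with
  | some v => if v ≠ "" then some v else none
  | none => none

-- ===== PORT A =====
-- one step of A's loop body over the four-dict state
def pvAStep (st : PySem.Dict String Int × PySem.Dict String Int × PySem.Dict String Int × PySem.Dict String Int)
    (e : List (String × String)) :
    PySem.Dict String Int × PySem.Dict String Int × PySem.Dict String Int × PySem.Dict String Int :=
  let (moves, statuses, hazards, abilities) := st
  let moves := match pvGet e "move" with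
    | some m => if m ≠ "" then moves.insert m (moves.getD m 0 + 1) else moves
    | none => moves
  let statuses := if pvGet e "type" = some "status" then
      match pvGet e "status" with
      | some s => if s ≠ "" then statuses.insert s (statuses.getD s 0 + 1) else statuses
      | none => statuses
    else statuses
  let hazards := if pvGet e "type" = some "hazard" then
      match pvGet e "hazard" with
      | some h => if h ≠ "" then hazards.insert h (hazards.getD h 0 + 1) else hazards
      | none => hazards
    else hazards
  let abilities := if pvGet e "type" = some "ability" then
      match pvGet e "ability" with
      | some a => if a ≠ "" then abilities.insert a (abilities.getD a 0 + 1) else abilities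
      | none => abilities
    else abilities
  (moves, statuses, hazards, abilities)

def summarize_log_py (log : List (List (String × String))) : List (String × List (String × Int)) :=
  let st := log.foldl pvAStep (PySem.Dict.empty, PySem.Dict.empty, PySem.Dict.empty, PySem.Dict.empty)
  [("moves", st.1.items), ("statuses", st.2.1.items),
   ("hazards", st.2.2.1.items), ("abilities", st.2.2.2.items)]

-- ===== PORT B =====
-- the token (category, key) a truthy field value yields
def pvTok (cat : String) (o : Option String) : List (String × String) :=
  match o with
  | some v => [(cat, v)]
  | none => []

-- the (category, key) tokens one entry appends to the stream
def pvEvents (e : List (String × String)) : List (String × String) :=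
  pvTok "moves" (pvField e "move") ++
  ([("statuses", "status"), ("hazards", "hazard"), ("abilities", "ability")].flatMap
    (fun cf => if pvGet e "type" = some cf.2 then pvTok cf.1 (pvField e cf.2) else []))

def summarize_log_py_alt (log : List (List (String × String))) : List (String × List (String × Int)) :=
  let stream := log.flatMap pvEvents
  let counts := stream.foldl (fun d t => d.insert t (d.getD t 0 + 1))
    (PySem.Dict.empty : PySem.Dict (String × String) Int)
  ["moves", "statuses", "hazards", "abilities"].map (fun cat =>
    (cat, counts.items.filterMap (fun p =>
      if p.1.1 = cat then some (p.1.2, p.2) else none)))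

-- ===== PRECONDITION & SPEC =====
def Spec_summarize_log_py (log : List (List (String × String))) (out : List (String × List (String × Int))) : Prop := out = summarize_log_py_alt log
instance (log : List (List (String × String))) (out : List (String × List (String × Int))) : Decidable (Spec_summarize_log_py log out) := by unfold Spec_summarize_log_py; infer_instance

-- ===== CLAIM (what is proved, stated in full; the proofs are below) =====
def Claim_equal_summarize_log_py : Prop := ∀ (log : List (List (String × String))), Dom_summarize_log_py log → Spec_summarize_log_py log (summarize_log_py log)

-- ===== LEMMAS AND PROOFS =====

-- the per-category guard A effectively counts with
def pvGuard (cat field : String) (e : List (String × String)) : Option String :=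
  if cat = "moves" then pvField e "move"
  else if pvGet e "type" = some field then pvField e field else none

-- projection of a token onto category cat
def pvProj (cat : String) (t : String × String) : Option String :=
  if t.1 = cat then some t.2 else none

lemma pvProj_eq_some {cat : String} {t : String × String} {k : String} :
    pvProj cat t = some k ↔ t = (cat, k) := by
  unfold pvProj
  split_ifs with h
  · constructor
    · rintro ⟨rfl⟩; exact Prod.ext h rfl
    · rintro rfl; rfl
  · constructor
    · rintro ⟨⟩
    · rintro rfl; exact absurd rfl h

lemma pvMem_filterMap_proj {cat k : String} {l : List (String × String)} :
    k ∈ l.filterMap (pvProj cat) ↔ (cat, k) ∈ l := by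
  simp [List.mem_filterMap, pvProj_eq_some]

-- the four component step functions A's loop interleaves
def pvStepOf (g : List (String × String) → Option String)
    (d : PySem.Dict String Int) (e : List (String × String)) : PySem.Dict String Int :=
  match g e with
  | some k => d.insert k (d.getD k 0 + 1)
  | none => d

lemma pvMatchField (d : PySem.Dict String Int) (e : List (String × String)) (k : String) :
    (match pvGet e k with
     | some v => if v ≠ "" then d.insert v (d.getD v 0 + 1) else d
     | none => d) =
    (match pvField e k with
     | some v => d.insert v (d.getD v 0 + 1)
     | none => d) := by
  unfold pvField
  cases pvGet e k with
  | none => rfl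
  | some v => by_cases hv : v = "" <;> simp [hv]

lemma pvAStep_eq (m s h a : PySem.Dict String Int) (e : List (String × String)) :
    pvAStep (m, s, h, a) e =
      (pvStepOf (pvGuard "moves" "move") m e,
       pvStepOf (pvGuard "statuses" "status") s e,
       pvStepOf (pvGuard "hazards" "hazard") h e,
       pvStepOf (pvGuard "abilities" "ability") a e) := by
  simp only [pvAStep, pvStepOf, pvGuard, Prod.mk.injEq, String.reduceEq, reduceIte]
  refine ⟨pvMatchField m e "move", ?_, ?_, ?_⟩ <;>
    split_ifs <;> first | exact pvMatchField _ _ _ | rfl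

-- A's fold over the 4-tuple splits into four independent folds
lemma pvAStep_split (log : List (List (String × String)))
    (m s h a : PySem.Dict String Int) :
    log.foldl pvAStep (m, s, h, a) =
      (log.foldl (pvStepOf (pvGuard "moves" "move")) m,
       log.foldl (pvStepOf (pvGuard "statuses" "status")) s,
       log.foldl (pvStepOf (pvGuard "hazards" "hazard")) h,
       log.foldl (pvStepOf (pvGuard "abilities" "ability")) a) := by
  induction log generalizing m s h a with
  | nil => rfl
  | cons e rest ih =>
    simp only [List.foldl_cons, pvAStep_eq]
    exact ih _ _ _ _

-- a guarded counting fold over the log is the plain counting fold over the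
-- filterMap of its guard
lemma pvStepOf_filterMap (g : List (String × String) → Option String)
    (log : List (List (String × String))) (d : PySem.Dict String Int) :
    log.foldl (pvStepOf g) d =
      (log.filterMap g).foldl (fun d k => d.insert k (d.getD k 0 + 1)) d := by
  induction log generalizing d with
  | nil => rfl
  | cons e rest ih =>
    simp only [List.foldl_cons, List.filterMap_cons]
    cases hg : g e with
    | none => simp [pvStepOf, hg, ih]
    | some k => simp [pvStepOf, hg, ih]

-- a token list for category c, projected onto cat
lemma pvTok_proj (c cat : String) (o : Option String) :
    (pvTok c o).filterMap (pvProj cat) = if c = cat then o.toList else [] := by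
  cases o <;> by_cases h : c = cat <;> simp [pvTok, pvProj, h]

-- the tokens of one entry, projected onto a category, are that category's guard
lemma pvEvents_proj (e : List (String × String)) (cat field : String)
    (hcf : (cat, field) ∈ [("moves", "move"), ("statuses", "status"), ("hazards", "hazard"), ("abilities", "ability")]) :
    (pvEvents e).filterMap (pvProj cat) = (pvGuard cat field e).toList := by
  fin_cases hcf <;>
    simp [pvEvents, pvGuard, List.filterMap_append, pvTok_proj,
      apply_ite (List.filterMap (pvProj _))] <;>
    split_ifs <;> simp_all

-- the projected event stream is the per-category key list
lemma pvStream_proj (log : List (List (String × String))) (cat field : String)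
    (hcf : (cat, field) ∈ [("moves", "move"), ("statuses", "status"), ("hazards", "hazard"), ("abilities", "ability")]) :
    (log.flatMap pvEvents).filterMap (pvProj cat) = log.filterMap (pvGuard cat field) := by
  induction log with
  | nil => rfl
  | cons e rest ih =>
    simp only [List.flatMap_cons, List.filterMap_append, List.filterMap_cons,
      pvEvents_proj e cat field hcf, ih]
    cases pvGuard cat field e <;> rfl

-- Set.add of a token outside / inside category cat, seen through the projection
lemma pvAdd_proj_none (acc : List (String × String)) (cat : String) (t : String × String)
    (ht : pvProj cat t = none) :
    (PySem.Set.add acc t).filterMap (pvProj cat) = acc.filterMap (pvProj cat) := by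
  by_cases h : t ∈ acc <;>
    simp [PySem.Set.add, PySem.Set.contains, h, List.filterMap_append, ht]

lemma pvAdd_proj_some (acc : List (String × String)) (cat k : String) :
    (PySem.Set.add acc (cat, k)).filterMap (pvProj cat) =
      PySem.Set.add (acc.filterMap (pvProj cat)) k := by
  by_cases h : (cat, k) ∈ acc
  · simp [PySem.Set.add, PySem.Set.contains, h, pvMem_filterMap_proj.mpr h]
  · have h2 : k ∉ acc.filterMap (pvProj cat) := fun hh => h (pvMem_filterMap_proj.mp hh)
    simp [PySem.Set.add, PySem.Set.contains, h, h2, List.filterMap_append,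
      pvProj_eq_some.mpr rfl]

-- ordered dedup commutes with the (injective-where-defined) projection
lemma pvOfListAux (cat : String) (S acc : List (String × String)) :
    (S.foldl PySem.Set.add acc).filterMap (pvProj cat) =
      (S.filterMap (pvProj cat)).foldl PySem.Set.add (acc.filterMap (pvProj cat)) := by
  induction S generalizing acc with
  | nil => rfl
  | cons t rest ih =>
    simp only [List.foldl_cons, List.filterMap_cons]
    cases ht : pvProj cat t with
    | none => rw [ih (PySem.Set.add acc t), pvAdd_proj_none acc cat t ht]
    | some k =>
      have htk : t = (cat, k) := pvProj_eq_some.mp ht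
      subst htk
      rw [List.foldl_cons, ih (PySem.Set.add acc (cat, k)), pvAdd_proj_some]

lemma pvOfList_proj (S : List (String × String)) (cat : String) :
    (PySem.Set.ofList S).filterMap (pvProj cat) = PySem.Set.ofList (S.filterMap (pvProj cat)) := by
  rw [PySem.Set.ofList_eq_foldl, PySem.Set.ofList_eq_foldl]
  exact pvOfListAux cat S []

-- token counts project to key counts
lemma pvCount_proj (S : List (String × String)) (cat k : String) :
    S.count (cat, k) = (S.filterMap (pvProj cat)).count k := by
  induction S with
  | nil => rfl
  | cons t rest ih =>
    simp only [List.filterMap_cons]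
    cases ht : pvProj cat t with
    | none =>
      have : t ≠ (cat, k) := fun h => by simp [h, pvProj_eq_some.mpr rfl] at ht
      simp [ih, this]
    | some k' =>
      have htk : t = (cat, k') := pvProj_eq_some.mp ht
      subst htk
      by_cases hk : k' = k <;> simp [ih, hk, Prod.ext_iff]

-- the pairwise regrouping step of B, on any token list
lemma pvRegroup (xs : List (String × String)) (cat : String) (c : String × String → Int) :
    xs.filterMap (fun t => if t.1 = cat then some (t.2, c t) else none) =
      (xs.filterMap (pvProj cat)).map (fun k => (k, c (cat, k))) := by
  induction xs with
  | nil => rfl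
  | cons t rest ih =>
    simp only [List.filterMap_cons]
    by_cases h : t.1 = cat
    · have : t = (cat, t.2) := Prod.ext h rfl
      simp [pvProj, h, ih, ← this]
    · simp [pvProj, h, ih]

-- B's per-category items, via the counter characterisation
lemma pvB_items (S : List (String × String)) (cat : String) :
    ((S.foldl (fun d t => d.insert t (d.getD t 0 + 1))
        (PySem.Dict.empty : PySem.Dict (String × String) Int)).items).filterMap
      (fun p => if p.1.1 = cat then some (p.1.2, p.2) else none) =
    (PySem.Set.ofList (S.filterMap (pvProj cat))).map
      (fun k => (k, ((S.filterMap (pvProj cat)).count k : Int))) := by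
  rw [PySem.Dict.foldl_insert_getD_add_one_eq_counter, PySem.Dict.items_counter,
    List.filterMap_map]
  have : ((PySem.Set.ofList S : List (String × String)).filterMap
      (fun t => if t.1 = cat then some (t.2, (S.count t : Int)) else none)) =
      ((PySem.Set.ofList S : List (String × String)).filterMap (pvProj cat)).map
        (fun k => (k, (S.count (cat, k) : Int))) :=
    pvRegroup _ cat (fun t => (S.count t : Int))
  rw [show (fun t => if t.1 = cat then some (t.2, (S.count t : Int)) else none) =
        ((fun p => if p.1.1 = cat then some (p.1.2, p.2) else none) ∘
          fun t => (t, (S.count t : Int))) from rfl] at this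
  rw [this, pvOfList_proj]
  exact List.map_congr_left (fun k _ => by rw [pvCount_proj])

-- the counting fold's items are exactly the ordered tally of the key list
lemma pvItems_eq (keys : List String) :
    ((keys.foldl (fun d k => d.insert k (d.getD k 0 + 1)) PySem.Dict.empty).items)
      = (PySem.Set.ofList keys).map (fun k => (k, (keys.count k : Int))) := by
  rw [PySem.Dict.foldl_insert_getD_add_one_eq_counter, PySem.Dict.items_counter]

-- ===== VERDICT (by name: the statement is the Claim_ definition above) =====
theorem summarize_log_py_spec : Claim_equal_summarize_log_py := by
  intro log _
  show summarize_log_py log = summarize_log_py_alt log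
  simp only [summarize_log_py, summarize_log_py_alt, pvAStep_split, pvStepOf_filterMap,
    pvItems_eq, List.map_cons, List.map_nil]
  rw [pvB_items, pvB_items, pvB_items, pvB_items,
    pvStream_proj log "moves" "move" (by simp),
    pvStream_proj log "statuses" "status" (by simp),
    pvStream_proj log "hazards" "hazard" (by simp),
    pvStream_proj log "abilities" "ability" (by simp)]
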